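-- pv_equiv track=rewrite | github.com/svaberg/batcamp | resample_grid_vs_ray.py | _resolution_ramp
-- ===== SOURCE A (Python) =====
-- def _resolution_ramp(min_resolution: int, max_resolution: int) -> list[int]:
--     """Return the doubled resolution ramp `min, 2*min, ...` up to `max`."""
--     if int(min_resolution) <= 0:
--         raise ValueError("min_resolution must be positive.")
--     if int(max_resolution) < int(min_resolution):
--         raise ValueError("max_resolution must be >= min_resolution.")
--
--     out: list[int] = []
--     n = int(min_resolution)
--     while n <= int(max_resolution):
--         out.append(n)
--         n *= 2
--     return out
-- ===== SOURCE B (Python) =====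
-- def _resolution_ramp(min_resolution: int, max_resolution: int) -> list[int]:
--     """Return the doubled resolution ramp `min, 2*min, ...` up to `max`."""
--     if int(min_resolution) <= 0:
--         raise ValueError("min_resolution must be positive.")
--     if int(max_resolution) < int(min_resolution):
--         raise ValueError("max_resolution must be >= min_resolution.")
--
--     m = int(min_resolution)
--     count = (int(max_resolution) // m).bit_length()
--     return [m * (1 << i) for i in range(count)]
-- ===== Notes on version B (the rewrite author's own statement) =====
-- stated objective: alternative
-- what changed: Replaces the condition-tested while-doubling loop by a closed-form count: count = (max//min).bit_length() doublings, then direct indexed generation [min*(1<<i) for i in range(count)].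
import Mathlib
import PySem

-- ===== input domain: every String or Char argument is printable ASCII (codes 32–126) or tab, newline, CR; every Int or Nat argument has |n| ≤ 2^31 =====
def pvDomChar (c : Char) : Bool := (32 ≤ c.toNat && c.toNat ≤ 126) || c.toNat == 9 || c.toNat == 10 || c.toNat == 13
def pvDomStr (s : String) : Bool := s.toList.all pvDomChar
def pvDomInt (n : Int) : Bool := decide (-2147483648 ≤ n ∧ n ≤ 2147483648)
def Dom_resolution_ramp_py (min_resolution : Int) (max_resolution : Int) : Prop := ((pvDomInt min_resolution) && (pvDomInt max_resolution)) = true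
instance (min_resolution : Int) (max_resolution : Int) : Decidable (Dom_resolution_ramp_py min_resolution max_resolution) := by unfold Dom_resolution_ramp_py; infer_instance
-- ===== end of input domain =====

-- B replaces A's condition-tested while-doubling loop by a closed-form count of doublings
-- ((max//min).bit_length()) followed by direct indexed list generation; alternative decomposition, same cost.
-- Both programs raise ValueError on min_resolution ≤ 0 or max_resolution < min_resolution: excluded by Pre_.

-- ===== PORT A =====
-- the while loop `while n <= int(max): out.append(n); n *= 2`; the positivity argument
-- is only for termination and carries no computation
def rampLoopA (maxR : Int) (n : Int) (hn : 0 < n) : List Int :=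
  if n ≤ maxR then
    n :: rampLoopA maxR (n * 2) (by omega)
  else
    []
termination_by (maxR + 1 - n).toNat
decreasing_by omega

def resolution_ramp_py (min_resolution : Int) (max_resolution : Int) : List Int :=
  if hpos : min_resolution ≤ 0 then []            -- Python: raise ValueError (excluded by Pre_)
  else if max_resolution < min_resolution then [] -- Python: raise ValueError (excluded by Pre_)
  else rampLoopA max_resolution min_resolution (by omega)

-- ===== PORT B =====
-- count = (max // min).bit_length(); `m * (1 << i)` ported as `m * 2^i` (exact: 1 <<< i = 2^i)
def resolution_ramp_py_alt (min_resolution : Int) (max_resolution : Int) : List Int :=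
  if min_resolution ≤ 0 then []                   -- Python: raise ValueError (excluded by Pre_)
  else if max_resolution < min_resolution then [] -- Python: raise ValueError (excluded by Pre_)
  else
    (List.range (PySem.Int.bitLength (PySem.Int.floordiv max_resolution min_resolution))).map
      (fun i => min_resolution * 2 ^ i)

-- ===== PRECONDITION & SPEC =====
-- Pre_ excludes exactly the inputs on which A raises ValueError (nonpositive min, or max < min).
def Pre_resolution_ramp_py (min_resolution : Int) (max_resolution : Int) : Prop :=
  0 < min_resolution ∧ min_resolution ≤ max_resolution
instance (min_resolution : Int) (max_resolution : Int) : Decidable (Pre_resolution_ramp_py min_resolution max_resolution) := by unfold Pre_resolution_ramp_py; infer_instance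
def pvWitness_resolution_ramp_py : Int × Int := (3, 25)

def Spec_resolution_ramp_py (min_resolution : Int) (max_resolution : Int) (out : List Int) : Prop := out = resolution_ramp_py_alt min_resolution max_resolution
instance (min_resolution : Int) (max_resolution : Int) (out : List Int) : Decidable (Spec_resolution_ramp_py min_resolution max_resolution out) := by unfold Spec_resolution_ramp_py; infer_instance

-- ===== CLAIM (what is proved, stated in full; the proofs are below) =====
def Claim_equal_resolution_ramp_py : Prop := ∀ (min_resolution : Int) (max_resolution : Int), Dom_resolution_ramp_py min_resolution max_resolution → Pre_resolution_ramp_py min_resolution max_resolution → Spec_resolution_ramp_py min_resolution max_resolution (resolution_ramp_py min_resolution max_resolution)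

-- ===== LEMMAS AND PROOFS =====

-- halving the quotient: (M // n) // 2 = M // (n*2) for 0 ≤ M, 0 < n
lemma floordiv_halve (M n : Int) (h0 : 0 ≤ M) (hn : 0 < n) :
    PySem.Int.floordiv (PySem.Int.floordiv M n) 2 = PySem.Int.floordiv M (n * 2) := by
  rw [PySem.Int.floordiv_eq_ediv_of_pos hn, PySem.Int.floordiv_eq_ediv_of_pos (by norm_num),
      PySem.Int.floordiv_eq_ediv_of_pos (by omega)]
  exact Int.ediv_ediv_of_nonneg (le_of_lt hn)

-- the loop collects exactly bitLength(M // n) doubled values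
lemma rampLoopA_eq (M : Int) (n : Int) (h0 : 0 ≤ M) (hn : 0 < n) :
    rampLoopA M n hn =
      (List.range (PySem.Int.bitLength (PySem.Int.floordiv M n))).map (fun i => n * 2 ^ i) := by
  rw [rampLoopA]
  split_ifs with h
  · have hq : 0 < PySem.Int.floordiv M n := by
      have := (PySem.Int.le_floordiv_iff_mul_le (a := M) (b := n) (q := 1) hn).mpr (by omega)
      omega
    rw [rampLoopA_eq M (n * 2) h0 (by omega),
        PySem.Int.bitLength_of_pos hq, floordiv_halve M n h0 hn,
        List.range_succ_eq_map, List.map_cons, List.map_map]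
    simp only [pow_zero, mul_one]
    refine congrArg _ (List.map_congr_left fun i _ => ?_)
    simp only [Function.comp]
    rw [pow_succ]
    ring
  · have : PySem.Int.floordiv M n = 0 := by
      rw [PySem.Int.floordiv_eq_iff_of_pos hn]
      omega
    simp [this]
termination_by (M + 1 - n).toNat
decreasing_by omega

-- ===== VERDICT (by name: the statement is the Claim_ definition above) =====
theorem resolution_ramp_py_spec : Claim_equal_resolution_ramp_py := by
  intro mn mx _ hpre
  obtain ⟨h1, h2⟩ := hpre
  unfold Spec_resolution_ramp_py resolution_ramp_py resolution_ramp_py_alt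
  rw [dif_neg (by omega), if_neg (by omega), if_neg (by omega), if_neg (by omega)]
  exact rampLoopA_eq mx mn (by omega) h1
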